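-- pv_equiv track=rewrite | github.com/Mejri10/codewars-solutions | 7-kyu/down-arrow-with-numbers/python/solution.py | get_a_down_arrow_of
-- ===== SOURCE A (Python) =====
-- def get_a_down_arrow_of(n):
--     size = 2*n - 1
--     res = []
--     for i in range(n, 0, -1):
--         line = ''.join(str(d%10) for d in range(1, i+1))
--         line = line + line[::-1][1:]
--         res.append(" " * (n-i) + line)
--     return '\n'.join(res)
-- ===== SOURCE B (Python) =====
-- def get_a_down_arrow_of(n):
--     if n <= 0:
--         return ''
--     line = '1'
--     rows = [' ' * (n - 1) + line]
--     for i in range(2, n + 1):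
--         line = line[:i - 1] + str(i % 10) + line[i - 2:]
--         rows.append(' ' * (n - i) + line)
--     return '\n'.join(reversed(rows))
-- ===== Notes on version B (the rewrite author's own statement) =====
-- stated objective: faster
-- what changed: B builds the rows bottom-up by dynamic programming: each row is the previous row with the new middle digit spliced in by two O(1)-call slices, collected narrowest-first and reversed at the end, instead of re-joining an ascending digit string and its reversed tail for every row.
import Mathlib
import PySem

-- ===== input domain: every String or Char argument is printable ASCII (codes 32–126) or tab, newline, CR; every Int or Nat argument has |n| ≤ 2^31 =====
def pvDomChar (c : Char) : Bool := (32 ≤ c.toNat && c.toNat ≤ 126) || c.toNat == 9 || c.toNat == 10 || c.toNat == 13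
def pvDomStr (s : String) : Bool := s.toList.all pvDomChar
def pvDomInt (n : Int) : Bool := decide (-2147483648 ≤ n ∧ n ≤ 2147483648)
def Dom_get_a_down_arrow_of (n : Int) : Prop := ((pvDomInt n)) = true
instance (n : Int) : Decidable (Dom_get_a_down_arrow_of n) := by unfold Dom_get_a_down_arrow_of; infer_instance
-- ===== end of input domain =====

-- B builds the rows bottom-up, splicing the new middle digit into the previous row by
-- two slices, instead of re-joining an ascending half and its reversed tail per row;
-- objective: faster (constant factor).

-- ===== PORT A =====
-- line = ''.join(str(d%10) for d in range(1, i+1))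
def pvHalfA (i : Int) : List Char :=
  PySem.Chars.join []
    ((PySem.List.pyRange 1 (i + 1) 1).map (fun d => PySem.Int.toChars (PySem.Int.mod d 10)))

-- line = line + line[::-1][1:]
def pvLineA (i : Int) : List Char :=
  pvHalfA i ++ PySem.List.slice ((PySem.List.slice? (pvHalfA i) none none (-1)).getD []) (some 1) none

def get_a_down_arrow_of (n : Int) : String :=
  let res := (PySem.List.pyRange n 0 (-1)).foldl
    (fun res i => res ++ [PySem.List.pyRepeat [' '] (n - i) ++ pvLineA i]) []
  String.ofList (PySem.Chars.join ['\n'] res)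

-- ===== PORT B =====
-- loop body: line = line[:i-1] + str(i % 10) + line[i-2:]; rows.append(' '*(n-i) + line)
def pvStepB (n : Int) (st : List Char × List (List Char)) (i : Int) : List Char × List (List Char) :=
  let line := PySem.List.slice st.1 none (some (i - 1)) ++ PySem.Int.toChars (PySem.Int.mod i 10) ++ PySem.List.slice st.1 (some (i - 2)) none
  (line, st.2 ++ [PySem.List.pyRepeat [' '] (n - i) ++ line])

def get_a_down_arrow_of_alt (n : Int) : String :=
  if n ≤ 0 then ""
  else
    let st := (PySem.List.pyRange 2 (n + 1) 1).foldl (pvStepB n)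
      (['1'], [PySem.List.pyRepeat [' '] (n - 1) ++ ['1']])
    String.ofList (PySem.Chars.join ['\n'] st.2.reverse)

-- ===== PRECONDITION & SPEC =====
def Spec_get_a_down_arrow_of (n : Int) (out : String) : Prop := out = get_a_down_arrow_of_alt n
instance (n : Int) (out : String) : Decidable (Spec_get_a_down_arrow_of n out) := by unfold Spec_get_a_down_arrow_of; infer_instance

-- ===== CLAIM (what is proved, stated in full; the proofs are below) =====
def Claim_equal_get_a_down_arrow_of : Prop := ∀ (n : Int), Dom_get_a_down_arrow_of n → Spec_get_a_down_arrow_of n (get_a_down_arrow_of n)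

-- ===== LEMMAS AND PROOFS =====

-- the character str(d % 10) produces (d % 10 is always in 0..9)
def pvDigit (d : Int) : Char := Char.ofNat (48 + (PySem.Int.mod d 10).toNat)

-- canonical row with peak i: character k is the digit of i - |i-1-k|
def pvRow (i : Int) : List Char :=
  (PySem.List.pyRange 0 (2 * i - 1) 1).map (fun k => pvDigit (i - |i - 1 - k|))

-- a digit 0..9 prints as a single character
theorem toChars_digit (m : Int) (h0 : 0 ≤ m) (h9 : m < 10) :
    PySem.Int.toChars m = [Char.ofNat (48 + m.toNat)] := by
  interval_cases m <;> decide

theorem toChars_mod_ten (d : Int) : PySem.Int.toChars (PySem.Int.mod d 10) = [pvDigit d] :=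
  toChars_digit _ (PySem.Int.mod_nonneg d (by omega)) (PySem.Int.mod_lt d (by omega))

theorem pvRow_one : pvRow 1 = ['1'] := by decide

-- A's half-and-mirror row equals the canonical row
theorem lineA_eq_row (i : Int) (hi : 1 ≤ i) : pvLineA i = pvRow i := by
  have hline : pvHalfA i = (PySem.List.pyRange 1 (i + 1) 1).map (fun d => pvDigit d) := by
    unfold pvHalfA
    have : (PySem.List.pyRange 1 (i + 1) 1).map (fun d => PySem.Int.toChars (PySem.Int.mod d 10))
        = ((PySem.List.pyRange 1 (i + 1) 1).map (fun d => pvDigit d)).map (fun ch => [ch]) := by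
      rw [List.map_map]
      exact List.map_congr_left (fun d _ => toChars_mod_ten d)
    rw [this, PySem.Chars.join_nil_singletons]
  unfold pvLineA pvRow
  rw [hline, PySem.List.slice?_none_none_neg_one, Option.getD_some, PySem.List.slice_from_one]
  rw [PySem.List.pyRange_one 1 (i + 1), PySem.List.pyRange_one 0 (2 * i - 1)]
  simp only [List.map_map, Function.comp_def]
  set m : Nat := i.toNat with hm
  have hmi : (m : Int) = i := Int.toNat_of_nonneg (by omega)
  have h1 : (i + 1 - 1).toNat = m := by omega
  have h2 : (2 * i - 1 - 0).toNat = 2 * m - 1 := by omega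
  rw [h1, h2]
  apply List.ext_getElem
  · simp; omega
  · intro j hj1 hj2
    simp only [List.length_append, List.length_map, List.length_range, List.length_tail,
      List.length_reverse] at hj1 hj2 ⊢
    by_cases hjm : j < m
    · rw [List.getElem_append_left (by simpa using hjm)]
      simp only [List.getElem_map, List.getElem_range]
      congr 1
      rw [abs_of_nonneg (by omega)]
      omega
    · rw [Nat.not_lt] at hjm
      rw [List.getElem_append_right (by simpa using hjm)]
      simp only [List.length_map, List.length_range]
      rw [List.getElem_tail, List.getElem_reverse]
      simp only [List.getElem_map, List.getElem_range, List.length_map, List.length_range]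
      congr 1
      rw [abs_of_nonpos (by omega)]
      omega

-- splicing the middle digit into row (i-1) yields row i
theorem row_insert (i : Int) (hi : 2 ≤ i) :
    (pvRow (i - 1)).take (i - 1).toNat ++ [pvDigit i] ++ (pvRow (i - 1)).drop (i - 2).toNat
      = pvRow i := by
  unfold pvRow
  rw [PySem.List.pyRange_one 0 (2 * (i - 1) - 1), PySem.List.pyRange_one 0 (2 * i - 1)]
  simp only [List.map_map, Function.comp_def]
  set m : Nat := i.toNat with hm
  have hmi : (m : Int) = i := Int.toNat_of_nonneg (by omega)
  have h1 : (i - 1).toNat = m - 1 := by omega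
  have h2 : (i - 2).toNat = m - 2 := by omega
  have h3 : (2 * (i - 1) - 1 - 0).toNat = 2 * m - 3 := by omega
  have h4 : (2 * i - 1 - 0).toNat = 2 * m - 1 := by omega
  rw [h1, h2, h3, h4]
  apply List.ext_getElem
  · simp; omega
  · intro j hj1 hj2
    simp only [List.length_append, List.length_take, List.length_drop, List.length_map,
      List.length_range, List.length_cons, List.length_nil] at hj1 hj2 ⊢
    by_cases hja : j < m - 1
    · rw [List.getElem_append_left (by simp; omega), List.getElem_append_left (by simp; omega)]
      rw [List.getElem_take, List.getElem_map, List.getElem_map, List.getElem_range,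
        List.getElem_range]
      congr 1
      rw [abs_of_nonneg (by omega), abs_of_nonneg (by omega)]
      omega
    · rw [Nat.not_lt] at hja
      by_cases hjb : j < m
      · have hje : j = m - 1 := by omega
        rw [List.getElem_append_left (by simp; omega), List.getElem_append_right (by simp; omega)]
        simp only [List.length_take, List.length_map, List.length_range, List.getElem_map,
          List.getElem_range, hje]
        simp only [List.getElem_singleton]
        congr 1
        rw [show i - 1 - (0 + ((m - 1 : Nat) : Int)) = 0 by omega, abs_zero, sub_zero]
      · rw [Nat.not_lt] at hjb
        rw [List.getElem_append_right (by simp; omega)]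
        simp only [List.length_append, List.length_take, List.length_map, List.length_range,
          List.length_cons, List.length_nil]
        rw [List.getElem_drop, List.getElem_map, List.getElem_map, List.getElem_range,
          List.getElem_range]
        congr 1
        rw [abs_of_nonpos (by omega), abs_of_nonpos (by omega)]
        omega

-- one loop step from row (a-1) produces row a and appends the new indented row
theorem stepB_eq (n a : Int) (ha : 2 ≤ a) (rows : List (List Char)) :
    pvStepB n (pvRow (a - 1), rows) a
      = (pvRow a, rows ++ [PySem.List.pyRepeat [' '] (n - a) ++ pvRow a]) := by
  unfold pvStepB
  simp only
  rw [PySem.List.slice_to _ (by omega : (0:Int) ≤ a - 1),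
    PySem.List.slice_from _ (by omega : (0:Int) ≤ a - 2), toChars_mod_ten,
    row_insert a ha]

-- the loop invariant: folding pvStepB over range(a, a+t) ends at row (a-1+t) and appends each row
theorem foldl_stepB (n : Int) (t : Nat) : ∀ (a : Int), 2 ≤ a → ∀ (rows : List (List Char)),
    (PySem.List.pyRange a (a + t) 1).foldl (pvStepB n) (pvRow (a - 1), rows)
      = (pvRow (a - 1 + t),
         rows ++ (PySem.List.pyRange a (a + t) 1).map
           (fun i => PySem.List.pyRepeat [' '] (n - i) ++ pvRow i)) := by
  induction t with
  | zero =>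
    intro a _ rows
    rw [show a + ((0 : Nat) : Int) = a by push_cast; ring, PySem.List.pyRange_one_eq_nil le_rfl]
    simp
  | succ t ih =>
    intro a ha rows
    rw [PySem.List.pyRange_one_cons (by push_cast; omega), List.foldl_cons, stepB_eq n a ha rows]
    have ih' := ih (a + 1) (by omega) (rows ++ [PySem.List.pyRepeat [' '] (n - a) ++ pvRow a])
    rw [show a + 1 - 1 = a by ring] at ih'
    rw [show a + ((t + 1 : Nat) : Int) = a + 1 + (t : Nat) by push_cast; ring, ih',
      show a - 1 + ((t + 1 : Nat) : Int) = a + (t : Nat) by push_cast; ring, List.map_cons]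
    simp [List.append_assoc]

-- appending rows one by one is a map
theorem foldl_append_singleton {α β : Type} (g : α → β) (l : List α) (acc : List β) :
    l.foldl (fun r x => r ++ [g x]) acc = acc ++ l.map g := by
  induction l generalizing acc with
  | nil => simp
  | cons x xs ih => simp [List.foldl_cons, ih]

-- ===== VERDICT (by name: the statement is the Claim_ definition above) =====
theorem get_a_down_arrow_of_spec : Claim_equal_get_a_down_arrow_of := by
  intro n _
  unfold Spec_get_a_down_arrow_of get_a_down_arrow_of get_a_down_arrow_of_alt
  by_cases hn : n ≤ 0
  · rw [if_pos hn, PySem.List.pyRange_neg_one_eq_nil hn]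
    rfl
  · rw [if_neg hn]
    rw [foldl_append_singleton]
    simp only [List.nil_append]
    -- A's descending loop is the reverse of the ascending rows
    rw [PySem.List.pyRange_neg_one_eq_reverse, List.map_reverse]
    have hA : (PySem.List.pyRange (0 + 1) (n + 1) 1).map
          (fun i => PySem.List.pyRepeat [' '] (n - i) ++ pvLineA i)
        = (PySem.List.pyRange 1 (n + 1) 1).map
          (fun i => PySem.List.pyRepeat [' '] (n - i) ++ pvRow i) := by
      rw [show (0 : Int) + 1 = 1 by norm_num]
      apply List.map_congr_left
      intro i hi
      rw [PySem.List.mem_pyRange_one] at hi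
      rw [lineA_eq_row i hi.1]
    rw [hA]
    -- B's fold via the invariant
    have hrow1 : (['1'] : List Char) = pvRow (2 - 1) := by rw [show (2:Int) - 1 = 1 by norm_num, pvRow_one]
    rw [hrow1, show n + 1 = 2 + ((n - 1).toNat : Int) by omega,
      foldl_stepB n (n - 1).toNat 2 le_rfl]
    simp only
    congr 2
    rw [show (2 : Int) + ((n - 1).toNat : Int) = n + 1 by omega] at *
    rw [PySem.List.pyRange_one_cons (show (1:Int) < n + 1 by omega)]
    norm_num [List.map_cons, pvRow_one]
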